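-- pv_equiv track=rewrite | github.com/sungyubkim/nsys-ai | src/nsys_ai/timeline/logic.py | nice_tick_interval
-- ===== SOURCE A (Python) =====
-- def nice_tick_interval(timeline_w: int, ns_per_col: int, tick_density: int = 6) -> int:
--     """Choose a 'nice' tick interval such that ticks aren't too dense.
--
--     Returns a nanosecond interval that results in roughly `tick_density`
--     ticks across the visible viewport.
--     """
--     total_ns = ns_per_col * timeline_w
--     rough = total_ns // tick_density
--
--     # Round to nice power-of-10 multiples: 1, 2, 5, 10, 20, 50, …
--     if rough <= 0:
--         return 1
--     magnitude = 10 ** (len(str(rough)) - 1)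
--     for factor in (1, 2, 5, 10):
--         candidate = factor * magnitude
--         if candidate >= rough:
--             return candidate
--     return rough
-- ===== SOURCE B (Python) =====
-- def nice_tick_interval(timeline_w: int, ns_per_col: int, tick_density: int = 6) -> int:
--     """Same spec as A, but scans nice values per decade from below
--     instead of computing the decimal magnitude via len(str(...))."""
--     total_ns = ns_per_col * timeline_w
--     rough = total_ns // tick_density
--     if rough <= 0:
--         return 1
--     tick = 1
--     while True:
--         for factor in (1, 2, 5):
--             if factor * tick >= rough:
--                 return factor * tick
--         tick *= 10
-- ===== Notes on version B (the rewrite author's own statement) =====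
-- stated objective: simpler
-- what changed: B drops the len(str(rough)) decimal-magnitude computation and instead scans nice values from below, multiplying a tick by 10 per decade and returning the smallest nice multiple of the tick that reaches rough.
import Mathlib
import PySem

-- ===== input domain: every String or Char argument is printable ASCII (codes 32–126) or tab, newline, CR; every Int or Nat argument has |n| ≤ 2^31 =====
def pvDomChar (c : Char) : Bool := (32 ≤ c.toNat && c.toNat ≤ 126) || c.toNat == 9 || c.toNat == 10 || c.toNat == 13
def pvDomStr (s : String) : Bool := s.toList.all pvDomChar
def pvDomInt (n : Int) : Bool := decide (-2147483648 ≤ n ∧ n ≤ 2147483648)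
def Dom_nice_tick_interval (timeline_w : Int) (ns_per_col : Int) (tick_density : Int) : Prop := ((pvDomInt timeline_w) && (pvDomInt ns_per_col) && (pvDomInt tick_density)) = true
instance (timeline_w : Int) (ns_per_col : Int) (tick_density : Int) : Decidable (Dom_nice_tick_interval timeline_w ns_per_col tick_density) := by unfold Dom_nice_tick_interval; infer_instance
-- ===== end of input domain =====

-- B replaces A's len(str(rough)) magnitude computation by a bottom-up scan of nice
-- values per decade; objective: simpler.

-- ===== PORT A =====
-- A's 'per-factor …' loop with the final 'return rough' fallback.
def pvLoopA : List Int → Int → Int → Int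
  | [], _, rough => rough
  | f :: rest, mag, rough =>
      if f * mag ≥ rough then f * mag else pvLoopA rest mag rough

def nice_tick_interval (timeline_w : Int) (ns_per_col : Int) (tick_density : Int) : Int :=
  let total_ns := ns_per_col * timeline_w
  let rough := PySem.Int.floordiv total_ns tick_density
  if rough ≤ 0 then 1
  else
    -- magnitude = 10 ** (len(str(rough)) - 1); the exponent is ≥ 0 here, toNat is exact
    let magnitude : Int := (10 : Int) ^ (PySem.Str.len (PySem.Int.toStr rough) - 1).toNat
    pvLoopA [1, 2, 5, 10] magnitude rough

-- ===== PORT B =====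
-- B's 'while True' loop over the per-decade factors; the 0 < tick proof
-- argument only justifies termination.
def pvLoopB (rough : Int) (tick : Int) (ht : 0 < tick) : Int :=
  if 1 * tick ≥ rough then 1 * tick
  else if 2 * tick ≥ rough then 2 * tick
  else if 5 * tick ≥ rough then 5 * tick
  else pvLoopB rough (10 * tick) (by omega)
termination_by (rough - tick).toNat
decreasing_by omega

def nice_tick_interval_alt (timeline_w : Int) (ns_per_col : Int) (tick_density : Int) : Int :=
  let total_ns := ns_per_col * timeline_w
  let rough := PySem.Int.floordiv total_ns tick_density
  if rough ≤ 0 then 1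
  else pvLoopB rough 1 (by norm_num)

-- ===== PRECONDITION & SPEC =====
-- Pre_ excludes only tick_density = 0, on which A raises ZeroDivisionError.
def Pre_nice_tick_interval (timeline_w : Int) (ns_per_col : Int) (tick_density : Int) : Prop := tick_density ≠ 0
instance (timeline_w : Int) (ns_per_col : Int) (tick_density : Int) : Decidable (Pre_nice_tick_interval timeline_w ns_per_col tick_density) := by unfold Pre_nice_tick_interval; infer_instance
def pvWitness_nice_tick_interval : Int × Int × Int := (120, 1000, 6)

def Spec_nice_tick_interval (timeline_w : Int) (ns_per_col : Int) (tick_density : Int) (out : Int) : Prop := out = nice_tick_interval_alt timeline_w ns_per_col tick_density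
instance (timeline_w : Int) (ns_per_col : Int) (tick_density : Int) (out : Int) : Decidable (Spec_nice_tick_interval timeline_w ns_per_col tick_density out) := by unfold Spec_nice_tick_interval; infer_instance

-- ===== CLAIM (what is proved, stated in full; the proofs are below) =====
def Claim_equal_nice_tick_interval : Prop := ∀ (timeline_w : Int) (ns_per_col : Int) (tick_density : Int), Dom_nice_tick_interval timeline_w ns_per_col tick_density → Pre_nice_tick_interval timeline_w ns_per_col tick_density → Spec_nice_tick_interval timeline_w ns_per_col tick_density (nice_tick_interval timeline_w ns_per_col tick_density)

-- ===== LEMMAS AND PROOFS =====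

-- length of Nat.toDigits 10 n is the number of decimal digits
lemma pv_toDigitsCore_len (f : Nat) : ∀ n : Nat, n < f →
    (Nat.toDigitsCore 10 f n []).length = Nat.log 10 n + 1 := by
  induction f with
  | zero => intro n h; omega
  | succ f ih =>
    intro n hn
    rw [Nat.toDigitsCore]
    by_cases h : n / 10 = 0
    · simp [h, Nat.log_eq_zero_iff, Nat.lt_of_div_eq_zero (by norm_num) h]
    · simp only [h, if_false]
      rw [Nat.toDigitsCore_lens_eq 10 f (n / 10) (Nat.digitChar (n % 10)) []]
      have hlt : n / 10 < f := by
        have := Nat.div_lt_self (Nat.pos_of_ne_zero (by omega)) (by norm_num : 1 < 10)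
        omega
      rw [ih (n / 10) hlt]
      have hn10 : 10 ≤ n := by
        by_contra hc
        exact h (Nat.div_eq_of_lt (by omega))
      rw [Nat.log_div_base 10 n]
      have := Nat.log_pos (by norm_num : 1 < 10) hn10
      omega

lemma pv_len_toStr (n : Nat) : (Nat.toDigits 10 n).length = Nat.log 10 n + 1 :=
  pv_toDigitsCore_len (n + 1) n (by omega)

-- unfolding pvLoopB one decade down
lemma pvLoopB_step (rough tick : Int) (ht : 0 < tick) (h : 10 * tick ≤ rough) :
    pvLoopB rough tick ht = pvLoopB rough (10 * tick) (by omega) := by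
  rw [pvLoopB]
  rw [if_neg (by omega : ¬ (1 * tick ≥ rough)), if_neg (by omega : ¬ (2 * tick ≥ rough)),
      if_neg (by omega : ¬ (5 * tick ≥ rough))]

lemma pvLoopB_pow (rough : Int) (k : Nat) (h : (10 : Int) ^ k ≤ rough) :
    pvLoopB rough 1 (by norm_num) = pvLoopB rough ((10 : Int) ^ k) (by positivity) := by
  induction k with
  | zero => simp
  | succ k ih =>
    have hk : (10 : Int) ^ k ≤ rough := le_trans (by
      have : (10 : Int) ^ k ≤ 10 ^ (k + 1) :=
        pow_le_pow_right₀ (by norm_num) (by omega)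
      exact this) h
    rw [ih hk, pvLoopB_step rough ((10:Int)^k) (by positivity)
        (by rw [show (10:Int) * 10 ^ k = 10 ^ (k+1) by ring]; exact h)]
    congr 1
    ring

-- A's loop versus B's loop at the true magnitude
lemma pv_loops_agree (rough mag : Int) (hm : 0 < mag) (hlo : mag ≤ rough)
    (hhi : rough ≤ 10 * mag) :
    pvLoopA [1, 2, 5, 10] mag rough = pvLoopB rough mag hm := by
  simp only [pvLoopA]
  rw [pvLoopB]
  split_ifs with h1 h2 h5
  · rfl
  · rfl
  · rfl
  · rw [pvLoopB, if_pos (by omega : 1 * (10 * mag) ≥ rough)]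
    ring

-- ===== VERDICT (by name: the statement is the Claim_ definition above) =====
theorem nice_tick_interval_spec : Claim_equal_nice_tick_interval := by
  intro w npc td _ _
  unfold Spec_nice_tick_interval nice_tick_interval nice_tick_interval_alt
  dsimp only []
  generalize PySem.Int.floordiv (npc * w) td = rough
  by_cases h0 : rough ≤ 0
  · rw [if_pos h0, if_pos h0]
  · rw [if_neg h0, if_neg h0]
    have hpos : 0 < rough := by omega
    have htn : (rough.toNat : Int) = rough := Int.toNat_of_nonneg (le_of_lt hpos)
    -- identify the magnitude with 10 ^ log10 rough
    have hlen : PySem.Str.len (PySem.Int.toStr rough) - 1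
        = (Nat.log 10 rough.toNat : Int) := by
      have h : (PySem.Int.toStr rough).toList = PySem.Int.toChars rough :=
        PySem.Int.toList_toStr rough
      simp only [PySem.Str.len, h, PySem.Int.toChars, if_neg (by omega : ¬ rough < 0)]
      rw [pv_len_toStr rough.toNat]
      push_cast
      ring
    set L := Nat.log 10 rough.toNat with hL
    have hmag : ((10 : Int) ^ (PySem.Str.len (PySem.Int.toStr rough) - 1).toNat)
        = (10 : Int) ^ L := by rw [hlen]; simp
    rw [hmag]
    have hlo : (10 : Int) ^ L ≤ rough := by
      have h1 := Nat.pow_log_le_self 10 (show rough.toNat ≠ 0 by omega)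
      have h2 : ((10 ^ L : Nat) : Int) ≤ (rough.toNat : Int) := by exact_mod_cast h1
      push_cast at h2
      omega
    have hhi : rough ≤ 10 * (10 : Int) ^ L := by
      have h1 := Nat.lt_pow_succ_log_self (by norm_num : 1 < 10) rough.toNat
      have h2 : (rough.toNat : Int) < ((10 ^ (L + 1) : Nat) : Int) := by exact_mod_cast h1
      push_cast at h2
      have h3 : (10 : Int) ^ (L + 1) = 10 * 10 ^ L := by ring
      omega
    rw [pv_loops_agree rough ((10 : Int) ^ L) (by positivity) hlo hhi,
        pvLoopB_pow rough L hlo]
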